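-- pv_equiv track=rewrite | github.com/saketjajoo/Project-Euler | 37.py | getalltruncs
-- ===== SOURCE A (Python) =====
-- def getalltruncs(n):
--     no = str(n)
--     l = []
--     for i in range(1,len(no)):
--         l.append(int(no[i:]))
--     no = str(n)
--     for i in range(len(no)-2,-1,-1):
--         l.append(int(no[0:i+1]))
--     return l
-- ===== SOURCE B (Python) =====
-- def _suffixes(t):
--     if len(t) <= 1:
--         return []
--     u = t[1:]
--     return [int(u)] + _suffixes(u)
--
--
-- def _prefixes(t):
--     if len(t) <= 1:
--         return []
--     u = t[:-1]
--     return [int(u)] + _prefixes(u)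
--
--
-- def getalltruncs(n):
--     s = str(n)
--     return _suffixes(s) + _prefixes(s)
-- ===== Notes on version B (the rewrite author's own statement) =====
-- stated objective: alternative
-- what changed: B replaces A's two index-driven range loops (forward over suffix start indices, then a backward range over prefix end indices) by two index-free recursive helpers that peel one character off the decimal string at a time (t[1:] for suffixes, t[:-1] for prefixes) and cons the parsed truncation onto the recursive result.
import Mathlib
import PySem

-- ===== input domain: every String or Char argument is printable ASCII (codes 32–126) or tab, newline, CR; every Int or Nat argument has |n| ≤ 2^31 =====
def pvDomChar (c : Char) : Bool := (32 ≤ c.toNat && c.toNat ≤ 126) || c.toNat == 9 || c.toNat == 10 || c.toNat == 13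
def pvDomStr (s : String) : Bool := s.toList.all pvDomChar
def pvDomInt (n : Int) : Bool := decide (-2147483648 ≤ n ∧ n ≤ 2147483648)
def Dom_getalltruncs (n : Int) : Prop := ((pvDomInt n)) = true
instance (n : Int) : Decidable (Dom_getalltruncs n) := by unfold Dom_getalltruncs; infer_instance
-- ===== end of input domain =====

-- B replaces A's two index-driven range loops over str(n) by two recursive helpers that peel
-- one character at a time (objective: alternative decomposition, same cost).

-- ===== PORT A =====
-- str(n) → PySem.Int.toStr, no[i:] / no[0:i+1] → PySem.Str.slice, int(...) → PySem.Int.ofStr?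
-- (ofStr? is none exactly where Python raises ValueError; Pre_ excludes those inputs, so .getD 0 is never read)
def getalltruncs (n : Int) : List Int :=
  let no := PySem.Int.toStr n
  let l : List Int :=
    (PySem.List.pyRange 1 (PySem.Str.len no) 1).foldl
      (fun l i => l ++ [(PySem.Int.ofStr? (PySem.Str.slice no (some i) none)).getD 0]) []
  let no := PySem.Int.toStr n
  (PySem.List.pyRange (PySem.Str.len no - 2) (-1) (-1)).foldl
    (fun l i => l ++ [(PySem.Int.ofStr? (PySem.Str.slice no (some 0) (some (i + 1)))).getD 0]) l

-- ===== PORT B =====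
-- _suffixes(t): [int(t[1:])] + _suffixes(t[1:]) while len(t) > 1
def suffixesB (t : String) : List Int :=
  if _h : PySem.Str.len t ≤ 1 then []
  else
    let u := PySem.Str.slice t (some 1) none
    (PySem.Int.ofStr? u).getD 0 :: suffixesB u
termination_by t.toList.length
decreasing_by
  simp only [PySem.Str.toList_slice, PySem.Chars.slice_eq_listSlice, PySem.List.slice_from_one]
  rw [PySem.Str.len_eq] at _h
  have := List.length_tail (l := t.toList)
  omega

-- _prefixes(t): [int(t[:-1])] + _prefixes(t[:-1]) while len(t) > 1
def prefixesB (t : String) : List Int :=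
  if _h : PySem.Str.len t ≤ 1 then []
  else
    let u := PySem.Str.slice t none (some (-1))
    (PySem.Int.ofStr? u).getD 0 :: prefixesB u
termination_by t.toList.length
decreasing_by
  simp only [PySem.Str.slice_to_neg_one]
  rw [PySem.Str.len_eq] at _h
  have := List.length_dropLast (xs := t.toList)
  omega

def getalltruncs_alt (n : Int) : List Int :=
  let s := PySem.Int.toStr n
  suffixesB s ++ prefixesB s

-- ===== PRECONDITION & SPEC =====
-- Pre_ excludes exactly the inputs on which Python A raises: for negative n the prefix
-- loop eventually calls int on just the minus sign, a ValueError.  (The proved equality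
-- of the two ports does not need this hypothesis — B raises in the same place — but Pre_
-- marks where Python A returns normally, which is what the claim is about.)
def Pre_getalltruncs (n : Int) : Prop := 0 ≤ n
instance (n : Int) : Decidable (Pre_getalltruncs n) := by unfold Pre_getalltruncs; infer_instance
def pvWitness_getalltruncs : Int := 1234

def Spec_getalltruncs (n : Int) (out : List Int) : Prop := out = getalltruncs_alt n
instance (n : Int) (out : List Int) : Decidable (Spec_getalltruncs n out) := by unfold Spec_getalltruncs; infer_instance

-- ===== CLAIM (what is proved, stated in full; the proofs are below) =====
def Claim_equal_getalltruncs : Prop := ∀ (n : Int), Dom_getalltruncs n → Pre_getalltruncs n → Spec_getalltruncs n (getalltruncs n)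

-- ===== LEMMAS AND PROOFS =====

-- the value both ports wrap around each parsed slice
def pvParse (cs : List Char) : Int := (PySem.Int.ofChars? cs).getD 0

theorem pyRange_one_up (d : Nat) :
    PySem.List.pyRange 1 (d : Int) 1 = (List.range (d - 1)).map (fun j => ((1 + j : Nat) : Int)) := by
  simp only [PySem.List.pyRange]
  norm_num
  split_ifs with h
  · rfl
  · have h0 : d - 1 = 0 := by omega
    simp [h0]

theorem pyRange_down (d : Nat) :
    PySem.List.pyRange ((d : Int) - 2) (-1) (-1) =
      (List.range (d - 1)).map (fun (j : Nat) => (d : Int) - 2 - (j : Int)) := by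
  rw [PySem.List.pyRange]
  rw [if_neg (by norm_num), if_neg (by norm_num)]
  rcases Nat.lt_or_ge 1 d with h | h
  · rw [if_pos (by omega)]
    have hc : (((d : Int) - 2 - -1 + - -1 - 1) / - -1).toNat = d - 1 := by
      norm_num; omega
    rw [hc]
    apply List.map_congr_left
    intro j _
    ring
  · rw [if_neg (by omega)]
    have h0 : d - 1 = 0 := by omega
    simp [h0]

theorem toStr_len_pos (n : Int) : 1 ≤ (PySem.Int.toStr n).toList.length := by
  rw [PySem.Int.toList_toStr, PySem.Int.toChars]
  split
  · simp
  · exact Nat.length_toDigits_pos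

theorem suffixesB_eq (t : String) :
    suffixesB t = (List.range (t.toList.length - 1)).map (fun j => pvParse (t.toList.drop (j + 1))) := by
  fun_induction suffixesB t with
  | case1 t h =>
    rw [PySem.Str.len_eq] at h
    simp only [show t.toList.length - 1 = 0 from by omega, List.range_zero, List.map_nil]
  | case2 t h u ih =>
    rw [PySem.Str.len_eq] at h
    have hu : u.toList = t.toList.tail := by
      simp only [u, PySem.Str.toList_slice, PySem.Chars.slice_eq_listSlice, PySem.List.slice_from_one]
    have hL : t.toList.length - 1 = (t.toList.length - 2) + 1 := by omega
    rw [hL, List.range_succ_eq_map, List.map_cons, List.map_map]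
    refine congrArg₂ List.cons ?_ ?_
    · rw [PySem.Int.ofStr?.eq_1, hu, pvParse, ← List.drop_one]
    · rw [ih, hu, ← List.drop_one, List.length_drop]
      have hl2 : t.toList.length - 1 - 1 = t.toList.length - 2 := by omega
      rw [hl2]
      apply List.map_congr_left
      intro j _
      simp [Function.comp]

theorem prefixesB_eq (t : String) :
    prefixesB t =
      (List.range (t.toList.length - 1)).map
        (fun j => pvParse (t.toList.take (t.toList.length - 1 - j))) := by
  fun_induction prefixesB t with
  | case1 t h =>
    rw [PySem.Str.len_eq] at h
    simp only [show t.toList.length - 1 = 0 from by omega, List.range_zero, List.map_nil]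
  | case2 t h u ih =>
    rw [PySem.Str.len_eq] at h
    have hu : u.toList = t.toList.dropLast := PySem.Str.slice_to_neg_one t
    have hL : t.toList.length - 1 = (t.toList.length - 2) + 1 := by omega
    rw [hL, List.range_succ_eq_map, List.map_cons, List.map_map]
    refine congrArg₂ List.cons ?_ ?_
    · rw [PySem.Int.ofStr?.eq_1, hu, pvParse, List.dropLast_eq_take]
      have : t.toList.length - 2 + 1 - 0 = t.toList.length - 1 := by omega
      rw [this]
    · rw [ih, hu, List.length_dropLast]
      have hl2 : t.toList.length - 1 - 1 = t.toList.length - 2 := by omega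
      rw [hl2]
      apply List.map_congr_left
      intro j hj
      simp only [Function.comp]
      rw [List.dropLast_eq_take, List.take_take]
      congr 1
      have hlt : t.toList.length = t.length := by
        simp
      simp at hj
      congr 1
      omega

theorem getalltruncs_eq (n : Int) :
    getalltruncs n =
      (List.range ((PySem.Int.toStr n).toList.length - 1)).map
          (fun j => pvParse ((PySem.Int.toStr n).toList.drop (j + 1))) ++
        (List.range ((PySem.Int.toStr n).toList.length - 1)).map
          (fun j => pvParse ((PySem.Int.toStr n).toList.take ((PySem.Int.toStr n).toList.length - 1 - j))) := by
  have hd1 := toStr_len_pos n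
  rw [getalltruncs]
  simp only [PySem.Str.len_eq]
  rw [pyRange_one_up, pyRange_down]
  rw [List.foldl_map, List.foldl_map]
  rw [PySem.List.foldl_append_singleton_eq_map, PySem.List.foldl_append_singleton_eq_map]
  simp only [List.nil_append]
  refine congrArg₂ List.append ?_ ?_
  · apply List.map_congr_left
    intro j _
    rw [PySem.Int.ofStr?.eq_1, PySem.Str.toList_slice, PySem.Chars.slice_eq_listSlice,
        PySem.List.slice_from_natCast, pvParse, Nat.add_comm 1 j]
  · apply List.map_congr_left
    intro j hj
    simp only [List.mem_range] at hj
    have hb : (0 : Int) ≤ ((PySem.Int.toStr n).toList.length : Int) - 2 - (j : Int) + 1 := by omega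
    rw [PySem.Int.ofStr?.eq_1, PySem.Str.toList_slice, PySem.Chars.slice_eq_listSlice,
        PySem.List.slice_zero_start, PySem.List.slice_to _ hb, pvParse]
    congr 3
    omega

-- ===== VERDICT (by name: the statement is the Claim_ definition above) =====
theorem getalltruncs_spec : Claim_equal_getalltruncs := by
  intro n _ _
  show getalltruncs n = getalltruncs_alt n
  have halt : getalltruncs_alt n = suffixesB (PySem.Int.toStr n) ++ prefixesB (PySem.Int.toStr n) := rfl
  rw [halt, getalltruncs_eq, suffixesB_eq, prefixesB_eq]
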